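-- pv_equiv track=rewrite | github.com/lxlscut/leecode | island.py | get_island
-- ===== SOURCE A (Python) =====
-- def get_island(input):
--     final_result = 0
--     for i in range(len(input)):
--         for j  in range(len(input[i])):
--             # 找到一个起点
--             if(input[i][j] ==0):
--                 input[i][j] = 1
--                 result = find_4_neighbor(i,j,input)
--                 if result == 0:
--                     final_result += 1
--     return final_result
--
-- def find_4_neighbor(start0,start1,input):
--
--     flag0=0
--     flag1=0
--     flag2=0
--     flag3=0
--     try:
--         if input[start0][start1 + 1] == 0:
--             input[start0][start1 + 1] = 1
--             flag0 = find_4_neighbor(start0, start1 + 1, input)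
--     except Exception as e:
--         flag0=1
--         pass
--     try:
--         if input[start0 + 1][start1] == 0:
--             input[start0 + 1][start1] = 1
--             flag1 = find_4_neighbor(start0 + 1, start1, input)
--     except Exception  as e:
--         flag1=1
--         pass
--
--     try:
--         if input[start0 - 1][start1] == 0  and  (start0-1)>=0:
--             input[start0 - 1][start1] = 1
--             flag2 = find_4_neighbor(start0 - 1, start1, input)
--         if  (start0 - 1) < 0:
--             flag2 = 1
--     except Exception as e:
--         flag2=1
--         pass
--
--     try:
--         if input[start0][start1 - 1] == 0  and  (start1-1)>=0:
--             input[start0][start1 - 1] = 1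
--             flag3 = find_4_neighbor(start0, start1 - 1, input)
--         elif  (start1-1)<0:
--             flag3 = 1
--     except Exception as e:
--         flag3 = 1
--         pass
--
--     return flag0+flag1+flag2+flag3
-- ===== SOURCE B (Python) =====
-- def get_island(input):
--     final_result = 0
--     for r in range(len(input)):
--         for c in range(len(input[r])):
--             if input[r][c] == 0:
--                 input[r][c] = 1
--                 touched = False
--                 stack = [(r, c)]
--                 while stack:
--                     i, j = stack.pop()
--                     # right
--                     if j + 1 < len(input[i]):
--                         if input[i][j + 1] == 0:
--                             input[i][j + 1] = 1
--                             stack.append((i, j + 1))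
--                     else:
--                         touched = True
--                     # down
--                     if i + 1 < len(input) and j < len(input[i + 1]):
--                         if input[i + 1][j] == 0:
--                             input[i + 1][j] = 1
--                             stack.append((i + 1, j))
--                     else:
--                         touched = True
--                     # up
--                     if i - 1 >= 0 and j < len(input[i - 1]):
--                         if input[i - 1][j] == 0:
--                             input[i - 1][j] = 1
--                             stack.append((i - 1, j))
--                     else:
--                         touched = True
--                     # left
--                     if j - 1 >= 0:
--                         if input[i][j - 1] == 0:
--                             input[i][j - 1] = 1
--                             stack.append((i, j - 1))
--                     else:
--                         touched = True
--                 if not touched: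
--                     final_result += 1
--     return final_result
-- ===== Notes on version B (the rewrite author's own statement) =====
-- stated objective: alternative
-- what changed: The recursive exception-driven neighbor function (try/except around each indexing, border flags summed up the recursion) is replaced by an iterative stack-based flood fill with explicit per-direction bounds checks and a single boolean touched flag per component.
import Mathlib
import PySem

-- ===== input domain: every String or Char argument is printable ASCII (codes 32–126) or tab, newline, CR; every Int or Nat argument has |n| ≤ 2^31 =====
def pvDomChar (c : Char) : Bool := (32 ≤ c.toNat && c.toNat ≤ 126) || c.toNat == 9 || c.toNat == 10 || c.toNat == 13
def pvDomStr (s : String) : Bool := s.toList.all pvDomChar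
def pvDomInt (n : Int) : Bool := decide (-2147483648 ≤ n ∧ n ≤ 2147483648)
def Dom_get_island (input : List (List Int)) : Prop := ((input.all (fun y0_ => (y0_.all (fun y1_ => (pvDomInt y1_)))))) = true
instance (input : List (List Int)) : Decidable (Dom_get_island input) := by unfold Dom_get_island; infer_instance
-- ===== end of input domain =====

-- B replaces A's recursive, exception-driven neighbour walk (border flags summed up the recursion)
-- by an iterative stack-based flood fill with explicit bounds checks and one boolean `touched` flag.
-- Both Pythons mutate `input` in place (every reached 0 becomes 1, identically); the theorems below
-- are about the RETURN value.

-- helpers shared by the two ports ---------------------------------------------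

-- input[i][j] (Python indexing, possibly negative; none = IndexError)
def pyGet2 (g : List (List Int)) (i j : Int) : Option Int :=
  (PySem.List.pyGet? g i).bind (fun row => PySem.List.pyGet? row j)

-- input[i][j] = 1 (Python index assignment; only evaluated after a successful read
-- of the same cell in both Pythons, so the `none` fallbacks are never reached)
def pySet2 (g : List (List Int)) (i j : Int) : List (List Int) :=
  match PySem.List.pyGet? g i with
  | none => g
  | some row =>
    match PySem.List.pySet? row j (1 : Int) with
    | none => g
    | some row' => (PySem.List.pySet? g i row').getD g

-- number of 0-entries of the grid; used only to size the structural fuel of the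
-- recursions below (each recursive call / push consumes a freshly marked 0-cell,
-- so the fuel supplied by the drivers is never exhausted)
def zeros : List (List Int) → Nat
  | [] => 0
  | r :: g => r.count 0 + zeros g

-- ===== PORT A =====

-- find_4_neighbor: four direction attempts in Python's order (right, down, up, left);
-- a caught IndexError is flag = 1; negative-index reads wrap exactly as in Python.
def find4A : Nat → Int → Int → List (List Int) → Int × List (List Int)
  | 0, _, _, g => (0, g)
  | fuel+1, i, j, g =>
    let s0 : Int × List (List Int) :=
      match pyGet2 g i (j+1) with
      | none => (1, g)
      | some v => if v = 0 then find4A fuel i (j+1) (pySet2 g i (j+1)) else (0, g)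
    let s1 : Int × List (List Int) :=
      match pyGet2 s0.2 (i+1) j with
      | none => (1, s0.2)
      | some v => if v = 0 then find4A fuel (i+1) j (pySet2 s0.2 (i+1) j) else (0, s0.2)
    let s2 : Int × List (List Int) :=
      match pyGet2 s1.2 (i-1) j with
      | none => (1, s1.2)
      | some v =>
        if v = 0 ∧ 0 ≤ i - 1 then find4A fuel (i-1) j (pySet2 s1.2 (i-1) j)
        else if i - 1 < 0 then (1, s1.2) else (0, s1.2)
    let s3 : Int × List (List Int) :=
      match pyGet2 s2.2 i (j-1) with
      | none => (1, s2.2)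
      | some v =>
        if v = 0 ∧ 0 ≤ j - 1 then find4A fuel i (j-1) (pySet2 s2.2 i (j-1))
        else if j - 1 < 0 then (1, s2.2) else (0, s2.2)
    (s0.1 + s1.1 + s2.1 + s3.1, s3.2)

def innerA (i : Nat) : List Nat → List (List Int) × Int → List (List Int) × Int
  | [], s => s
  | j :: js, (g, cnt) =>
    match pyGet2 g (i : Int) (j : Int) with
    | some v =>
      if v = 0 then
        let g1 := pySet2 g (i : Int) (j : Int)
        let r := find4A (zeros g1 + 1) (i : Int) (j : Int) g1
        innerA i js (r.2, if r.1 = 0 then cnt + 1 else cnt)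
      else innerA i js (g, cnt)
    | none => innerA i js (g, cnt)

def outerA : List Nat → List (List Int) × Int → List (List Int) × Int
  | [], s => s
  | i :: is, (g, cnt) => outerA is (innerA i (List.range ((g[i]?.getD []).length)) (g, cnt))

def get_island (input : List (List Int)) : Int :=
  (outerA (List.range input.length) (input, 0)).2

-- ===== PORT B =====

-- len(input[i]) as an Int (reads are guarded by bounds checks in B)
def rowLenI (g : List (List Int)) (i : Int) : Int :=
  (((PySem.List.pyGet? g i).getD []).length : Int)

-- stack-based flood fill; Python's stack.pop()/append() at the list end is the
-- head of the Lean list (stack top); state per direction: (grid, stack, touched)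
def floodB : Nat → List (Int × Int) → List (List Int) → Bool → List (List Int) × Bool
  | 0, _, g, t => (g, t)
  | _+1, [], g, t => (g, t)
  | fuel+1, (i, j) :: rest, g, t =>
    let p0 : List (List Int) × List (Int × Int) × Bool :=
      if j + 1 < rowLenI g i then
        if pyGet2 g i (j+1) = some 0 then (pySet2 g i (j+1), (i, j+1) :: rest, t)
        else (g, rest, t)
      else (g, rest, true)
    let p1 : List (List Int) × List (Int × Int) × Bool :=
      if i + 1 < (p0.1.length : Int) ∧ j < rowLenI p0.1 (i+1) then
        if pyGet2 p0.1 (i+1) j = some 0 then (pySet2 p0.1 (i+1) j, (i+1, j) :: p0.2.1, p0.2.2)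
        else (p0.1, p0.2.1, p0.2.2)
      else (p0.1, p0.2.1, true)
    let p2 : List (List Int) × List (Int × Int) × Bool :=
      if 0 ≤ i - 1 ∧ j < rowLenI p1.1 (i-1) then
        if pyGet2 p1.1 (i-1) j = some 0 then (pySet2 p1.1 (i-1) j, (i-1, j) :: p1.2.1, p1.2.2)
        else (p1.1, p1.2.1, p1.2.2)
      else (p1.1, p1.2.1, true)
    let p3 : List (List Int) × List (Int × Int) × Bool :=
      if 0 ≤ j - 1 then
        if pyGet2 p2.1 i (j-1) = some 0 then (pySet2 p2.1 i (j-1), (i, j-1) :: p2.2.1, p2.2.2)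
        else (p2.1, p2.2.1, p2.2.2)
      else (p2.1, p2.2.1, true)
    floodB fuel p3.2.1 p3.1 p3.2.2

def innerB (i : Nat) : List Nat → List (List Int) × Int → List (List Int) × Int
  | [], s => s
  | j :: js, (g, cnt) =>
    match pyGet2 g (i : Int) (j : Int) with
    | some v =>
      if v = 0 then
        let g1 := pySet2 g (i : Int) (j : Int)
        let r := floodB (5 * zeros g1 + 5) [((i : Int), (j : Int))] g1 false
        innerB i js (r.1, if r.2 then cnt else cnt + 1)
      else innerB i js (g, cnt)
    | none => innerB i js (g, cnt)

def outerB : List Nat → List (List Int) × Int → List (List Int) × Int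
  | [], s => s
  | i :: is, (g, cnt) => outerB is (innerB i (List.range ((g[i]?.getD []).length)) (g, cnt))

def get_island_alt (input : List (List Int)) : Int :=
  (outerB (List.range input.length) (input, 0)).2

-- ===== PRECONDITION & SPEC =====
def Spec_get_island (input : List (List Int)) (out : Int) : Prop := out = get_island_alt input
instance (input : List (List Int)) (out : Int) : Decidable (Spec_get_island input out) := by unfold Spec_get_island; infer_instance

-- ===== CLAIM (what is proved, stated in full; the proofs are below) =====
def Claim_equal_get_island : Prop := ∀ (input : List (List Int)), Dom_get_island input → Spec_get_island input (get_island input)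

-- ===== LEMMAS AND PROOFS =====

-- proof layer: structural view of the grid --------------------------------------

def valN : List (List Int) → Nat × Nat → Option Int
  | [], _ => none
  | r :: _, (0, j) => r[j]?
  | _ :: g, (i+1, j) => valN g (i, j)

def setN : List (List Int) → Nat × Nat → List (List Int)
  | [], _ => []
  | r :: g, (0, j) => r.set j 1 :: g
  | r :: g, (i+1, j) => r :: setN g (i, j)

def rowLenN : List (List Int) → Nat → Nat
  | [], _ => 0
  | r :: _, 0 => r.length
  | _ :: g, i+1 => rowLenN g i

-- 4-adjacency of cells
def adjN (c d : Nat × Nat) : Prop :=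
  (d.1 = c.1 ∧ d.2 = c.2 + 1) ∨ (d.1 = c.1 + 1 ∧ d.2 = c.2) ∨
  (c.1 = d.1 + 1 ∧ d.2 = c.2) ∨ (d.1 = c.1 ∧ c.2 = d.2 + 1)

-- cells reachable from c stepping into 0-valued cells
inductive reach (g : List (List Int)) (c : Nat × Nat) : Nat × Nat → Prop
  | refl : reach g c c
  | step {d e} : reach g c d → adjN d e → valN g e = some 0 → reach g c e

-- the four per-direction "this neighbour is missing" conditions (shape-only)
def bd0 (g : List (List Int)) (c : Nat × Nat) : Prop := rowLenN g c.1 ≤ c.2 + 1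
def bd1 (g : List (List Int)) (c : Nat × Nat) : Prop := g.length ≤ c.1 + 1 ∨ rowLenN g (c.1+1) ≤ c.2
def bd2 (g : List (List Int)) (c : Nat × Nat) : Prop := c.1 = 0 ∨ rowLenN g (c.1-1) ≤ c.2
def bd3 (g : List (List Int)) (c : Nat × Nat) : Prop := c.2 = 0
def border (g : List (List Int)) (c : Nat × Nat) : Prop := bd0 g c ∨ bd1 g c ∨ bd2 g c ∨ bd3 g c

-- h is g with exactly the cells of S overwritten by 1
def Marks (g : List (List Int)) (S : Nat × Nat → Prop) (h : List (List Int)) : Prop :=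
  h.length = g.length ∧ (∀ i, rowLenN h i = rowLenN g i) ∧
  (∀ x, S x → valN h x = some 1) ∧ (∀ x, ¬ S x → valN h x = valN g x)

def SoundS (g : List (List Int)) (c : Nat × Nat) (S : Nat × Nat → Prop) : Prop :=
  ∀ x, S x → reach g c x ∧ valN g x = some 0

-- canonical description of one whole flood from c (A's find4A result)
def FSpecA (g : List (List Int)) (c : Nat × Nat) (r : Int × List (List Int)) : Prop :=
  r.2.length = g.length ∧ (∀ i, rowLenN r.2 i = rowLenN g i) ∧
  (∀ x, reach g c x → valN r.2 x = some 1) ∧ (∀ x, ¬ reach g c x → valN r.2 x = valN g x) ∧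
  0 ≤ r.1 ∧ (r.1 = 0 ↔ ∀ d, reach g c d → ¬ border g d)

def toCell (p : Int × Int) : Nat × Nat := (p.1.toNat, p.2.toNat)

def Reaches (g : List (List Int)) (ps : List (Int × Int)) (x : Nat × Nat) : Prop :=
  ∃ p ∈ ps, reach g (toCell p) x

-- canonical description of one whole flood from a stack (B's floodB result)
def FSpecB (g : List (List Int)) (ps : List (Int × Int)) (t : Bool) (r : List (List Int) × Bool) : Prop :=
  r.1.length = g.length ∧ (∀ i, rowLenN r.1 i = rowLenN g i) ∧
  (∀ x, Reaches g ps x → valN r.1 x = some 1) ∧ (∀ x, ¬ Reaches g ps x → valN r.1 x = valN g x) ∧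
  (r.2 = true ↔ t = true ∨ ∃ p ∈ ps, ∃ d, reach g (toCell p) d ∧ border g d)


-- basic facts about valN / setN / rowLenN / zeros -------------------------------

theorem valN_eq_getElem (g : List (List Int)) (i j : Nat) :
    valN g (i, j) = (g[i]?).bind (fun r => r[j]?) := by
  induction g generalizing i with
  | nil => simp [valN]
  | cons r g ih => cases i with
    | zero => simp [valN]
    | succ i => simpa [valN] using ih i

theorem pyGet2_natCast (g : List (List Int)) (i j : Nat) :
    pyGet2 g (i : Int) (j : Int) = valN g (i, j) := by
  simp [pyGet2, PySem.List.pyGet?_natCast, valN_eq_getElem]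

theorem rowLenN_eq (g : List (List Int)) (i : Nat) :
    rowLenN g i = (g[i]?.getD []).length := by
  induction g generalizing i with
  | nil => simp [rowLenN]
  | cons r g ih => cases i with
    | zero => simp [rowLenN]
    | succ i => simpa [rowLenN] using ih i

theorem rowLenI_natCast (g : List (List Int)) (i : Nat) :
    rowLenI g (i : Int) = (rowLenN g i : Int) := by
  simp [rowLenI, PySem.List.pyGet?_natCast, rowLenN_eq]

theorem valN_none_iff (g : List (List Int)) (i j : Nat) :
    valN g (i, j) = none ↔ g.length ≤ i ∨ rowLenN g i ≤ j := by
  rw [valN_eq_getElem, rowLenN_eq]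
  rcases hg : g[i]? with _ | r
  · have hi : g.length ≤ i := List.getElem?_eq_none_iff.1 hg
    simp [hg, hi]
  · have hi : i < g.length := (List.getElem?_eq_some_iff.1 hg).1
    simp [hg, List.getElem?_eq_none_iff]
    omega

theorem valN_lt_of_some (g : List (List Int)) (i j : Nat) (v : Int)
    (h : valN g (i, j) = some v) : i < g.length ∧ j < rowLenN g i := by
  rw [valN_eq_getElem] at h
  rcases hg : g[i]? with _ | r
  · rw [hg] at h; simp at h
  · rw [hg] at h; simp at h
    refine ⟨(List.getElem?_eq_some_iff.1 hg).1, ?_⟩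
    rw [rowLenN_eq, hg]
    simpa using (List.getElem?_eq_some_iff.1 h).1

theorem length_setN (g : List (List Int)) (c : Nat × Nat) : (setN g c).length = g.length := by
  obtain ⟨i, j⟩ := c
  induction g generalizing i with
  | nil => simp [setN]
  | cons r g ih => cases i with
    | zero => simp [setN]
    | succ i => simpa [setN] using ih i

theorem rowLenN_setN (g : List (List Int)) (c : Nat × Nat) (i : Nat) :
    rowLenN (setN g c) i = rowLenN g i := by
  obtain ⟨ci, cj⟩ := c
  induction g generalizing ci i with
  | nil => simp [setN]
  | cons r g ih =>
    cases ci with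
    | zero => cases i <;> simp [setN, rowLenN]
    | succ ci => cases i <;> simp [setN, rowLenN, ih]

theorem valN_setN_self (g : List (List Int)) (c : Nat × Nat) (v : Int)
    (h : valN g c = some v) : valN (setN g c) c = some 1 := by
  obtain ⟨i, j⟩ := c
  induction g generalizing i with
  | nil => simp [valN] at h
  | cons r g ih =>
    cases i with
    | zero =>
      have h' : r[j]? = some v := by simpa [valN] using h
      have hj := (List.getElem?_eq_some_iff.1 h').1
      simp [valN, setN, hj]
    | succ i => simpa [valN, setN] using ih i (by simpa [valN] using h)

theorem valN_setN_ne (g : List (List Int)) (c x : Nat × Nat) (h : x ≠ c) :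
    valN (setN g c) x = valN g x := by
  obtain ⟨ci, cj⟩ := c; obtain ⟨xi, xj⟩ := x
  induction g generalizing ci xi with
  | nil => simp [setN]
  | cons r g ih =>
    cases ci with
    | zero =>
      cases xi with
      | zero =>
        have hne : cj ≠ xj := by intro he; exact h (by simp [he])
        simp only [setN, valN]
        exact List.getElem?_set_ne hne
      | succ xi => simp [setN, valN]
    | succ ci =>
      cases xi with
      | zero => simp [setN, valN]
      | succ xi =>
        exact ih ci xi (by intro he; exact h (by simpa using he))

theorem count_set_one_lt (r : List Int) (j : Nat) (h : r[j]? = some 0) :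
    (r.set j 1).count 0 < r.count 0 := by
  induction r generalizing j with
  | nil => simp at h
  | cons a r ih =>
    cases j with
    | zero =>
      simp at h
      subst h
      simp [List.count_cons]
    | succ j =>
      have := ih j (by simpa using h)
      simp [List.count_cons]
      omega

theorem zeros_setN_lt (g : List (List Int)) (c : Nat × Nat) (h : valN g c = some 0) :
    zeros (setN g c) < zeros g := by
  obtain ⟨i, j⟩ := c
  induction g generalizing i with
  | nil => simp [valN] at h
  | cons r g ih =>
    cases i with
    | zero =>
      have := count_set_one_lt r j (by simpa [valN] using h)
      simp [setN, zeros]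
      omega
    | succ i =>
      have := ih i (by simpa [valN] using h)
      simp [setN, zeros]
      omega

theorem count_le_of_pointwise (r r' : List Int)
    (h : ∀ j : Nat, r'[j]? = r[j]? ∨ (r[j]? = some 0 ∧ r'[j]? = some 1)) :
    r'.count 0 ≤ r.count 0 := by
  induction r generalizing r' with
  | nil =>
    have h0 := h 0
    rcases r' with _ | ⟨b, t'⟩
    · simp
    · simp at h0
  | cons a r ih =>
    rcases r' with _ | ⟨b, t'⟩
    · simp
    · have htail := ih t' (fun j => by simpa using h (j + 1))
      have hhead := h 0
      simp at hhead
      rcases hhead with he | ⟨ha, hb⟩ <;> subst_vars <;> simp [List.count_cons] <;> omega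

theorem zeros_le_of_pointwise (g h : List (List Int)) (hl : h.length = g.length)
    (hp : ∀ x, valN h x = valN g x ∨ (valN g x = some 0 ∧ valN h x = some 1)) :
    zeros h ≤ zeros g := by
  induction g generalizing h with
  | nil =>
    rcases h with _ | _
    · simp
    · simp at hl
  | cons r g ih =>
    rcases h with _ | ⟨r', h⟩
    · simp at hl
    · have hhead := count_le_of_pointwise r r' (fun j => by simpa [valN] using hp (0, j))
      have htail := ih h (by simpa using hl) (fun x => by simpa [valN] using hp (x.1 + 1, x.2))
      simp [zeros]
      omega

theorem zeros_le_marks (g : List (List Int)) (S : Nat × Nat → Prop) (h : List (List Int))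
    (hM : Marks g S h) (hS : ∀ x, S x → valN g x = some 0) : zeros h ≤ zeros g := by
  refine zeros_le_of_pointwise g h hM.1 (fun x => ?_)
  by_cases hx : S x
  · exact Or.inr ⟨hS x hx, hM.2.2.1 x hx⟩
  · exact Or.inl (hM.2.2.2 x hx)

-- reach / border ---------------------------------------------------------------

theorem reach_trans {g : List (List Int)} {a b c : Nat × Nat}
    (h1 : reach g a b) (h2 : reach g b c) : reach g a c := by
  induction h2 with
  | refl => exact h1
  | step _ hadj hz ih => exact reach.step ih hadj hz

theorem reach_zero {g : List (List Int)} {c x : Nat × Nat} (h : reach g c x) :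
    x = c ∨ valN g x = some 0 := by
  cases h with
  | refl => exact Or.inl rfl
  | step _ _ hz => exact Or.inr hz

theorem reach_mono {g₁ g₂ : List (List Int)} {c x : Nat × Nat}
    (hz : ∀ y, valN g₂ y = some 0 → valN g₁ y = some 0) (h : reach g₂ c x) : reach g₁ c x := by
  induction h with
  | refl => exact reach.refl
  | step _ hadj h0 ih => exact reach.step ih hadj (hz _ h0)

theorem border_congr {g h : List (List Int)} (c : Nat × Nat)
    (hl : h.length = g.length) (hr : ∀ i, rowLenN h i = rowLenN g i) :
    border h c ↔ border g c := by
  simp [border, bd0, bd1, bd2, bd3, hl, hr]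

theorem adjN_cases {i j : Nat} {z : Nat × Nat} (h : adjN (i, j) z) :
    z = (i, j+1) ∨ z = (i+1, j) ∨ (1 ≤ i ∧ z = (i-1, j)) ∨ (1 ≤ j ∧ z = (i, j-1)) := by
  obtain ⟨zi, zj⟩ := z
  rcases h with ⟨h1, h2⟩ | ⟨h1, h2⟩ | ⟨h1, h2⟩ | ⟨h1, h2⟩ <;> simp at h1 h2 ⊢ <;> omega

theorem adjN_right (i j : Nat) : adjN (i, j) (i, j+1) := Or.inl ⟨rfl, rfl⟩
theorem adjN_down (i j : Nat) : adjN (i, j) (i+1, j) := Or.inr (Or.inl ⟨rfl, rfl⟩)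
theorem adjN_up (i j : Nat) (h : 1 ≤ i) : adjN (i, j) (i-1, j) :=
  Or.inr (Or.inr (Or.inl ⟨by omega, rfl⟩))
theorem adjN_left (i j : Nat) (h : 1 ≤ j) : adjN (i, j) (i, j-1) :=
  Or.inr (Or.inr (Or.inr ⟨rfl, by omega⟩))

theorem grid_ext (g g' : List (List Int)) (hl : g.length = g'.length)
    (hv : ∀ x, valN g x = valN g' x) : g = g' := by
  induction g generalizing g' with
  | nil => rcases g' with _ | _ <;> simp_all
  | cons r g ih =>
    rcases g' with _ | ⟨r', g'⟩
    · simp at hl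
    · have hhead : r = r' := List.ext_getElem? (fun j => by simpa [valN] using hv (0, j))
      have htail : g = g' := ih g' (by simpa using hl) (fun x => by simpa [valN] using hv (x.1 + 1, x.2))
      rw [hhead, htail]

theorem setN_eq_set (g : List (List Int)) (i j : Nat) (row : List Int)
    (h : g[i]? = some row) : setN g (i, j) = g.set i (row.set j 1) := by
  induction g generalizing i with
  | nil => simp at h
  | cons r g ih =>
    cases i with
    | zero => simp at h; simp [setN, h]
    | succ i => simp at h; simp [setN, ih i h]

theorem pySet2_natCast (g : List (List Int)) (i j : Nat) (v : Int)
    (h : valN g (i, j) = some v) : pySet2 g (i : Int) (j : Int) = setN g (i, j) := by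
  rw [valN_eq_getElem] at h
  rcases hg : g[i]? with _ | row
  · simp [hg] at h
  · simp [hg] at h
    have hj : j < row.length := (List.getElem?_eq_some_iff.1 h).1
    have hi : i < g.length := (List.getElem?_eq_some_iff.1 hg).1
    rw [pySet2]
    simp [PySem.List.pyGet?_natCast, hg, PySem.List.pySet?_natCast row j 1 hj,
      PySem.List.pySet?_natCast g i (row.set j 1) hi, setN_eq_set g i j row hg]


-- values in a marked grid --------------------------------------------------------

theorem marks_val_zero {g : List (List Int)} {S : Nat × Nat → Prop} {h : List (List Int)}
    {x : Nat × Nat} (hM : Marks g S h) (hx : valN h x = some 0) :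
    valN g x = some 0 ∧ ¬ S x := by
  by_cases hSx : S x
  · rw [hM.2.2.1 x hSx] at hx; simp at hx
  · exact ⟨(hM.2.2.2 x hSx) ▸ hx, hSx⟩

theorem marks_val_none {g : List (List Int)} {S : Nat × Nat → Prop} {h : List (List Int)}
    {x : Nat × Nat} (hM : Marks g S h) (hx : valN h x = none) :
    valN g x = none ∧ ¬ S x := by
  by_cases hSx : S x
  · rw [hM.2.2.1 x hSx] at hx; simp at hx
  · exact ⟨(hM.2.2.2 x hSx) ▸ hx, hSx⟩

-- one marked recursive call of A, described against the original grid g ----------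

theorem stepA_spec (fuel : Nat)
    (IH : ∀ (g : List (List Int)) (i j : Nat), zeros g < fuel → valN g (i, j) = some 1 →
      FSpecA g (i, j) (find4A fuel (i : Int) (j : Int) g))
    (g : List (List Int)) (c : Nat × Nat) (S : Nat × Nat → Prop) (h : List (List Int))
    (n1 n2 : Nat)
    (hM : Marks g S h) (hS : SoundS g c S) (hc : valN g c = some 1)
    (hadj : adjN c (n1, n2)) (hn : valN h (n1, n2) = some 0) (hfg : zeros g < fuel + 1) :
    ∃ S' : Nat × Nat → Prop,
      Marks g S' (find4A fuel (n1 : Int) (n2 : Int) (setN h (n1, n2))).2 ∧ SoundS g c S' ∧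
      (∀ x, S x → S' x) ∧ S' (n1, n2) ∧
      (∀ y z, S' y → ¬ S y → adjN y z → valN g z = some 0 → S' z) ∧
      0 ≤ (find4A fuel (n1 : Int) (n2 : Int) (setN h (n1, n2))).1 ∧
      ((find4A fuel (n1 : Int) (n2 : Int) (setN h (n1, n2))).1 = 0 ↔
        ∀ d, S' d → ¬ S d → ¬ border g d) := by
  obtain ⟨hgn, hnotS⟩ := marks_val_zero hM hn
  have hlen'' : (setN h (n1, n2)).length = g.length := (length_setN h (n1, n2)).trans hM.1
  have hrow'' : ∀ i, rowLenN (setN h (n1, n2)) i = rowLenN g i :=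
    fun i => (rowLenN_setN h (n1, n2) i).trans (hM.2.1 i)
  have hzh : zeros h ≤ zeros g := zeros_le_marks g S h hM (fun x hx => (hS x hx).2)
  have hz'' : zeros (setN h (n1, n2)) < fuel := by
    have := zeros_setN_lt h (n1, n2) hn; omega
  have hval''n : valN (setN h (n1, n2)) (n1, n2) = some 1 := valN_setN_self h (n1, n2) 0 hn
  have hspec := IH (setN h (n1, n2)) n1 n2 hz'' hval''n
  obtain ⟨hL, hR, hmark, hkeep, hpos, hflag⟩ := hspec
  set h'' := setN h (n1, n2) with hh''
  set r := find4A fuel (n1 : Int) (n2 : Int) h'' with hr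
  -- M = the cells the recursion marks
  set M : Nat × Nat → Prop := reach h'' (n1, n2) with hMdef
  have hMn : M (n1, n2) := reach.refl
  -- h''-zeros are g-zeros
  have hzsub : ∀ y, valN h'' y = some 0 → valN g y = some 0 := by
    intro y hy
    have hyn : y ≠ (n1, n2) := by
      intro he; rw [he, hval''n] at hy; simp at hy
    rw [valN_setN_ne h (n1, n2) y hyn] at hy
    exact (marks_val_zero hM hy).1
  have hMval : ∀ x, M x → valN g x = some 0 := by
    intro x hx
    rcases reach_zero hx with he | h0
    · rw [he]; exact hgn
    · exact hzsub x h0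
  have hMnotS : ∀ x, M x → ¬ S x := by
    intro x hx hSx
    have := hM.2.2.1 x hSx
    rcases reach_zero hx with he | h0
    · rw [he] at hSx; exact hnotS hSx
    · have hyn : x ≠ (n1, n2) := by
        intro he; rw [he, hval''n] at h0; simp at h0
      rw [valN_setN_ne h (n1, n2) x hyn, this] at h0; simp at h0
  have hMreach : ∀ x, M x → reach g c x := by
    intro x hx
    have h1 : reach g (n1, n2) x := reach_mono hzsub hx
    exact reach_trans (reach.step reach.refl hadj hgn) h1
  refine ⟨fun x => S x ∨ M x, ⟨hL.trans hlen'', fun i => (hR i).trans (hrow'' i), ?_, ?_⟩, ?_, fun x hx => Or.inl hx, Or.inr hMn, ?_, hpos, ?_⟩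
  · -- marked cells are 1
    rintro x (hSx | hMx)
    · by_cases hMx : M x
      · exact hmark x hMx
      · have hxn : x ≠ (n1, n2) := fun he => hMx (he ▸ hMn)
        rw [hkeep x hMx, valN_setN_ne h (n1, n2) x hxn]
        exact hM.2.2.1 x hSx
    · exact hmark x hMx
  · -- unmarked cells keep their g-value
    intro x hx
    push_neg at hx
    have hxn : x ≠ (n1, n2) := fun he => hx.2 (he ▸ hMn)
    rw [hkeep x hx.2, valN_setN_ne h (n1, n2) x hxn]
    exact hM.2.2.2 x hx.1
  · -- soundness
    rintro x (hSx | hMx)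
    · exact hS x hSx
    · exact ⟨hMreach x hMx, hMval x hMx⟩
  · -- closure of the newly marked part
    rintro y z (hSy | hMy) hnSy hadj' hz0
    · exact absurd hSy hnSy
    · by_cases hSz : S z
      · exact Or.inl hSz
      · by_cases hzn : z = (n1, n2)
        · exact Or.inr (hzn ▸ hMn)
        · refine Or.inr (reach.step hMy hadj' ?_)
          rw [valN_setN_ne h (n1, n2) z hzn, hM.2.2.2 z hSz]
          exact hz0
  · -- the flag characterisation
    have hbcong : ∀ d, border h'' d ↔ border g d := fun d => border_congr d hlen'' hrow''
    rw [hflag]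
    constructor
    · rintro hb d (hSd | hMd) hnSd
      · exact absurd hSd hnSd
      · exact fun hbd => (hb d hMd) ((hbcong d).2 hbd)
    · intro hb d hMd hbd
      exact hb d (Or.inr hMd) (hMnotS d hMd) ((hbcong d).1 hbd)

-- direction "right" of one find_4_neighbor call ----------------------------------

theorem stage0_spec (fuel : Nat)
    (IH : ∀ (g : List (List Int)) (i j : Nat), zeros g < fuel → valN g (i, j) = some 1 →
      FSpecA g (i, j) (find4A fuel (i : Int) (j : Int) g))
    (g : List (List Int)) (ci cj : Nat) (S : Nat × Nat → Prop) (h : List (List Int))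
    (hM : Marks g S h) (hS : SoundS g (ci, cj) S) (hc : valN g (ci, cj) = some 1)
    (hfg : zeros g < fuel + 1)
    (res : Int × List (List Int))
    (hres : res = match pyGet2 h (ci : Int) ((cj : Int) + 1) with
      | none => (1, h)
      | some v => if v = 0 then
          find4A fuel (ci : Int) ((cj : Int) + 1) (pySet2 h (ci : Int) ((cj : Int) + 1))
        else (0, h)) :
    ∃ S' : Nat × Nat → Prop, Marks g S' res.2 ∧ SoundS g (ci, cj) S' ∧ (∀ x, S x → S' x) ∧
      (∀ y z, S' y → ¬ S y → adjN y z → valN g z = some 0 → S' z) ∧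
      (valN g (ci, cj + 1) = some 0 → S' (ci, cj + 1)) ∧
      0 ≤ res.1 ∧
      (res.1 = 0 ↔ (¬ bd0 g (ci, cj) ∧ ∀ d, S' d → ¬ S d → ¬ border g d)) := by
  have hcast : ((cj : Int) + 1) = ((cj + 1 : Nat) : Int) := by push_cast; ring
  rcases hr : pyGet2 h (ci : Int) ((cj : Int) + 1) with _ | v
  · rw [hr] at hres
    rw [hcast, pyGet2_natCast] at hr
    obtain ⟨hgnone, hnS⟩ := marks_val_none hM hr
    have hci : ci < g.length := (valN_lt_of_some g ci cj 1 hc).1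
    have hbd : bd0 g (ci, cj) := by
      rcases (valN_none_iff g ci (cj + 1)).1 hgnone with h1 | h1
      · exact absurd h1 (by omega)
      · simpa [bd0] using h1
    subst hres
    refine ⟨S, hM, hS, fun _ hx => hx, fun y z hy hny => absurd hy hny,
      fun h0 => by simp [h0] at hgnone, by norm_num, ?_⟩
    constructor
    · intro h10; exact absurd h10 (by norm_num)
    · rintro ⟨hnbd, _⟩; exact absurd hbd hnbd
  · rw [hr] at hres
    rw [hcast, pyGet2_natCast] at hr
    by_cases hv : v = 0
    · subst hv
      replace hres : res = find4A fuel (ci : Int) ((cj : Int) + 1) (pySet2 h (ci : Int) ((cj : Int) + 1)) := by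
        rw [hres]; simp
      rw [hcast, pySet2_natCast h ci (cj + 1) 0 hr] at hres
      obtain ⟨S', hM', hS', hmono, hSn', hCL, hpos, hflag⟩ :=
        stepA_spec fuel IH g (ci, cj) S h ci (cj + 1) hM hS hc (adjN_right ci cj) hr hfg
      subst hres
      have hg0 := (marks_val_zero hM hr).1
      have hnbd : ¬ bd0 g (ci, cj) := by
        have := (valN_lt_of_some g ci (cj + 1) 0 hg0).2
        simp [bd0]; omega
      refine ⟨S', hM', hS', hmono, hCL, fun _ => hSn', hpos, ?_⟩
      rw [hflag]
      exact ⟨fun hb => ⟨hnbd, hb⟩, fun hb => hb.2⟩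
    · simp only [if_neg hv] at hres
      subst hres
      have hResv : valN g (ci, cj + 1) = some 0 → S (ci, cj + 1) := by
        intro h0; by_contra hnS
        rw [hM.2.2.2 _ hnS, h0] at hr
        simp at hr; exact hv hr.symm
      have hnbd : ¬ bd0 g (ci, cj) := by
        have := (valN_lt_of_some h ci (cj + 1) v hr).2
        rw [hM.2.1 ci] at this
        simp [bd0]; omega
      exact ⟨S, hM, hS, fun _ hx => hx, fun y z hy hny => absurd hy hny, hResv, by norm_num,
        ⟨fun _ => ⟨hnbd, fun d hd hnd => absurd hd hnd⟩, fun _ => rfl⟩⟩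

-- direction "down" ---------------------------------------------------------------

theorem stage1_spec (fuel : Nat)
    (IH : ∀ (g : List (List Int)) (i j : Nat), zeros g < fuel → valN g (i, j) = some 1 →
      FSpecA g (i, j) (find4A fuel (i : Int) (j : Int) g))
    (g : List (List Int)) (ci cj : Nat) (S : Nat × Nat → Prop) (h : List (List Int))
    (hM : Marks g S h) (hS : SoundS g (ci, cj) S) (hc : valN g (ci, cj) = some 1)
    (hfg : zeros g < fuel + 1)
    (res : Int × List (List Int))
    (hres : res = match pyGet2 h ((ci : Int) + 1) (cj : Int) with
      | none => (1, h)
      | some v => if v = 0 then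
          find4A fuel ((ci : Int) + 1) (cj : Int) (pySet2 h ((ci : Int) + 1) (cj : Int))
        else (0, h)) :
    ∃ S' : Nat × Nat → Prop, Marks g S' res.2 ∧ SoundS g (ci, cj) S' ∧ (∀ x, S x → S' x) ∧
      (∀ y z, S' y → ¬ S y → adjN y z → valN g z = some 0 → S' z) ∧
      (valN g (ci + 1, cj) = some 0 → S' (ci + 1, cj)) ∧
      0 ≤ res.1 ∧
      (res.1 = 0 ↔ (¬ bd1 g (ci, cj) ∧ ∀ d, S' d → ¬ S d → ¬ border g d)) := by
  have hcast : ((ci : Int) + 1) = ((ci + 1 : Nat) : Int) := by push_cast; ring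
  rcases hr : pyGet2 h ((ci : Int) + 1) (cj : Int) with _ | v
  · rw [hr] at hres
    rw [hcast, pyGet2_natCast] at hr
    obtain ⟨hgnone, hnS⟩ := marks_val_none hM hr
    have hbd : bd1 g (ci, cj) := by
      have h1 := (valN_none_iff g (ci + 1) cj).1 hgnone
      simpa [bd1] using h1
    subst hres
    refine ⟨S, hM, hS, fun _ hx => hx, fun y z hy hny => absurd hy hny,
      fun h0 => by simp [h0] at hgnone, by norm_num, ?_⟩
    constructor
    · intro h10; exact absurd h10 (by norm_num)
    · rintro ⟨hnbd, _⟩; exact absurd hbd hnbd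
  · rw [hr] at hres
    rw [hcast, pyGet2_natCast] at hr
    by_cases hv : v = 0
    · subst hv
      replace hres : res = find4A fuel ((ci : Int) + 1) (cj : Int) (pySet2 h ((ci : Int) + 1) (cj : Int)) := by
        rw [hres]; simp
      rw [hcast, pySet2_natCast h (ci + 1) cj 0 hr] at hres
      obtain ⟨S', hM', hS', hmono, hSn', hCL, hpos, hflag⟩ :=
        stepA_spec fuel IH g (ci, cj) S h (ci + 1) cj hM hS hc (adjN_down ci cj) hr hfg
      subst hres
      have hg0 := (marks_val_zero hM hr).1
      have hnbd : ¬ bd1 g (ci, cj) := by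
        have hlt := valN_lt_of_some g (ci + 1) cj 0 hg0
        simp [bd1]; omega
      refine ⟨S', hM', hS', hmono, hCL, fun _ => hSn', hpos, ?_⟩
      rw [hflag]
      exact ⟨fun hb => ⟨hnbd, hb⟩, fun hb => hb.2⟩
    · replace hres : res = ((0 : Int), h) := by rw [hres]; simp [hv]
      subst hres
      have hResv : valN g (ci + 1, cj) = some 0 → S (ci + 1, cj) := by
        intro h0; by_contra hnS
        rw [hM.2.2.2 _ hnS, h0] at hr
        simp at hr; exact hv hr.symm
      have hnbd : ¬ bd1 g (ci, cj) := by
        have hlt := valN_lt_of_some h (ci + 1) cj v hr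
        rw [hM.1] at hlt
        rw [hM.2.1 (ci + 1)] at hlt
        simp [bd1]; omega
      exact ⟨S, hM, hS, fun _ hx => hx, fun y z hy hny => absurd hy hny, hResv, by norm_num,
        ⟨fun _ => ⟨hnbd, fun d hd hnd => absurd hd hnd⟩, fun _ => rfl⟩⟩

-- direction "up" (Python reads input[i-1][j] first; i = 0 always ends as flag 1) --

theorem stage2_spec (fuel : Nat)
    (IH : ∀ (g : List (List Int)) (i j : Nat), zeros g < fuel → valN g (i, j) = some 1 →
      FSpecA g (i, j) (find4A fuel (i : Int) (j : Int) g))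
    (g : List (List Int)) (ci cj : Nat) (S : Nat × Nat → Prop) (h : List (List Int))
    (hM : Marks g S h) (hS : SoundS g (ci, cj) S) (hc : valN g (ci, cj) = some 1)
    (hfg : zeros g < fuel + 1)
    (res : Int × List (List Int))
    (hres : res = match pyGet2 h ((ci : Int) - 1) (cj : Int) with
      | none => (1, h)
      | some v =>
        if v = 0 ∧ 0 ≤ (ci : Int) - 1 then
          find4A fuel ((ci : Int) - 1) (cj : Int) (pySet2 h ((ci : Int) - 1) (cj : Int))
        else if (ci : Int) - 1 < 0 then (1, h) else (0, h)) :
    ∃ S' : Nat × Nat → Prop, Marks g S' res.2 ∧ SoundS g (ci, cj) S' ∧ (∀ x, S x → S' x) ∧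
      (∀ y z, S' y → ¬ S y → adjN y z → valN g z = some 0 → S' z) ∧
      (1 ≤ ci → valN g (ci - 1, cj) = some 0 → S' (ci - 1, cj)) ∧
      0 ≤ res.1 ∧
      (res.1 = 0 ↔ (¬ bd2 g (ci, cj) ∧ ∀ d, S' d → ¬ S d → ¬ border g d)) := by
  by_cases hci : ci = 0
  · have hbd : bd2 g (ci, cj) := Or.inl hci
    have hneg : (ci : Int) - 1 < 0 := by omega
    replace hres : res = ((1 : Int), h) := by
      rw [hres]
      rcases pyGet2 h ((ci : Int) - 1) (cj : Int) with _ | v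
      · rfl
      · simp [hneg]
        intro _ h1; exact absurd h1 (by omega)
    subst hres
    refine ⟨S, hM, hS, fun _ hx => hx, fun y z hy hny => absurd hy hny,
      fun h1 _ => absurd h1 (by omega), by norm_num, ?_⟩
    constructor
    · intro h10; exact absurd h10 (by norm_num)
    · rintro ⟨hnbd, _⟩; exact absurd hbd hnbd
  · have hcast : ((ci : Int) - 1) = ((ci - 1 : Nat) : Int) := by omega
    rcases hr : pyGet2 h ((ci : Int) - 1) (cj : Int) with _ | v
    · rw [hr] at hres
      rw [hcast, pyGet2_natCast] at hr
      obtain ⟨hgnone, hnS⟩ := marks_val_none hM hr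
      have hcilen : ci < g.length := (valN_lt_of_some g ci cj 1 hc).1
      have hbd : bd2 g (ci, cj) := by
        rcases (valN_none_iff g (ci - 1) cj).1 hgnone with h1 | h1
        · exact absurd h1 (by omega)
        · exact Or.inr h1
      subst hres
      refine ⟨S, hM, hS, fun _ hx => hx, fun y z hy hny => absurd hy hny,
        fun _ h0 => by simp [h0] at hgnone, by norm_num, ?_⟩
      constructor
      · intro h10; exact absurd h10 (by norm_num)
      · rintro ⟨hnbd, _⟩; exact absurd hbd hnbd
    · rw [hr] at hres
      rw [hcast, pyGet2_natCast] at hr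
      by_cases hv : v = 0
      · subst hv
        replace hres : res = find4A fuel ((ci : Int) - 1) (cj : Int) (pySet2 h ((ci : Int) - 1) (cj : Int)) := by
          rw [hres]; simp
          intro h0; exact absurd h0 hci
        rw [hcast, pySet2_natCast h (ci - 1) cj 0 hr] at hres
        obtain ⟨S', hM', hS', hmono, hSn', hCL, hpos, hflag⟩ :=
          stepA_spec fuel IH g (ci, cj) S h (ci - 1) cj hM hS hc (adjN_up ci cj (by omega)) hr hfg
        subst hres
        have hg0 := (marks_val_zero hM hr).1
        have hnbd : ¬ bd2 g (ci, cj) := by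
          have hlt := valN_lt_of_some g (ci - 1) cj 0 hg0
          simp [bd2]
          omega
        refine ⟨S', hM', hS', hmono, hCL, fun _ _ => hSn', hpos, ?_⟩
        rw [hflag]
        exact ⟨fun hb => ⟨hnbd, hb⟩, fun hb => hb.2⟩
      · replace hres : res = ((0 : Int), h) := by
          rw [hres]; simp [hv, show ¬ ((ci : Int) - 1 < 0) by omega]
        subst hres
        have hResv : 1 ≤ ci → valN g (ci - 1, cj) = some 0 → S (ci - 1, cj) := by
          intro _ h0; by_contra hnS
          rw [hM.2.2.2 _ hnS, h0] at hr
          simp at hr; exact hv hr.symm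
        have hnbd : ¬ bd2 g (ci, cj) := by
          have hlt := valN_lt_of_some h (ci - 1) cj v hr
          rw [hM.2.1 (ci - 1)] at hlt
          simp [bd2]
          omega
        exact ⟨S, hM, hS, fun _ hx => hx, fun y z hy hny => absurd hy hny, hResv, by norm_num,
          ⟨fun _ => ⟨hnbd, fun d hd hnd => absurd hd hnd⟩, fun _ => rfl⟩⟩

-- direction "left" (Python reads input[i][j-1] first; j = 0 always ends as flag 1) --

theorem stage3_spec (fuel : Nat)
    (IH : ∀ (g : List (List Int)) (i j : Nat), zeros g < fuel → valN g (i, j) = some 1 →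
      FSpecA g (i, j) (find4A fuel (i : Int) (j : Int) g))
    (g : List (List Int)) (ci cj : Nat) (S : Nat × Nat → Prop) (h : List (List Int))
    (hM : Marks g S h) (hS : SoundS g (ci, cj) S) (hc : valN g (ci, cj) = some 1)
    (hfg : zeros g < fuel + 1)
    (res : Int × List (List Int))
    (hres : res = match pyGet2 h (ci : Int) ((cj : Int) - 1) with
      | none => (1, h)
      | some v =>
        if v = 0 ∧ 0 ≤ (cj : Int) - 1 then
          find4A fuel (ci : Int) ((cj : Int) - 1) (pySet2 h (ci : Int) ((cj : Int) - 1))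
        else if (cj : Int) - 1 < 0 then (1, h) else (0, h)) :
    ∃ S' : Nat × Nat → Prop, Marks g S' res.2 ∧ SoundS g (ci, cj) S' ∧ (∀ x, S x → S' x) ∧
      (∀ y z, S' y → ¬ S y → adjN y z → valN g z = some 0 → S' z) ∧
      (1 ≤ cj → valN g (ci, cj - 1) = some 0 → S' (ci, cj - 1)) ∧
      0 ≤ res.1 ∧
      (res.1 = 0 ↔ (¬ bd3 g (ci, cj) ∧ ∀ d, S' d → ¬ S d → ¬ border g d)) := by
  by_cases hcj : cj = 0
  · have hbd : bd3 g (ci, cj) := hcj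
    have hneg : (cj : Int) - 1 < 0 := by omega
    replace hres : res = ((1 : Int), h) := by
      rw [hres]
      rcases pyGet2 h (ci : Int) ((cj : Int) - 1) with _ | v
      · rfl
      · simp [hneg]
        intro _ h1; exact absurd h1 (by omega)
    subst hres
    refine ⟨S, hM, hS, fun _ hx => hx, fun y z hy hny => absurd hy hny,
      fun h1 _ => absurd h1 (by omega), by norm_num, ?_⟩
    constructor
    · intro h10; exact absurd h10 (by norm_num)
    · rintro ⟨hnbd, _⟩; exact absurd hbd hnbd
  · have hcast : ((cj : Int) - 1) = ((cj - 1 : Nat) : Int) := by omega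
    rcases hr : pyGet2 h (ci : Int) ((cj : Int) - 1) with _ | v
    · rw [hr] at hres
      rw [hcast, pyGet2_natCast] at hr
      obtain ⟨hgnone, hnS⟩ := marks_val_none hM hr
      have hlt := valN_lt_of_some g ci cj 1 hc
      exfalso
      rcases (valN_none_iff g ci (cj - 1)).1 hgnone with h1 | h1 <;> omega
    · rw [hr] at hres
      rw [hcast, pyGet2_natCast] at hr
      by_cases hv : v = 0
      · subst hv
        replace hres : res = find4A fuel (ci : Int) ((cj : Int) - 1) (pySet2 h (ci : Int) ((cj : Int) - 1)) := by
          rw [hres]; simp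
          intro h0; exact absurd h0 hcj
        rw [hcast, pySet2_natCast h ci (cj - 1) 0 hr] at hres
        obtain ⟨S', hM', hS', hmono, hSn', hCL, hpos, hflag⟩ :=
          stepA_spec fuel IH g (ci, cj) S h ci (cj - 1) hM hS hc (adjN_left ci cj (by omega)) hr hfg
        subst hres
        have hnbd : ¬ bd3 g (ci, cj) := by simp [bd3]; omega
        refine ⟨S', hM', hS', hmono, hCL, fun _ _ => hSn', hpos, ?_⟩
        rw [hflag]
        exact ⟨fun hb => ⟨hnbd, hb⟩, fun hb => hb.2⟩
      · replace hres : res = ((0 : Int), h) := by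
          rw [hres]; simp [hv, show ¬ ((cj : Int) - 1 < 0) by omega]
        subst hres
        have hResv : 1 ≤ cj → valN g (ci, cj - 1) = some 0 → S (ci, cj - 1) := by
          intro _ h0; by_contra hnS
          rw [hM.2.2.2 _ hnS, h0] at hr
          simp at hr; exact hv hr.symm
        have hnbd : ¬ bd3 g (ci, cj) := by simp [bd3]; omega
        exact ⟨S, hM, hS, fun _ hx => hx, fun y z hy hny => absurd hy hny, hResv, by norm_num,
          ⟨fun _ => ⟨hnbd, fun d hd hnd => absurd hd hnd⟩, fun _ => rfl⟩⟩

-- assembling the four directions of one find_4_neighbor call ---------------------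

theorem assembleA (fuel : Nat)
    (IH : ∀ (g : List (List Int)) (i j : Nat), zeros g < fuel → valN g (i, j) = some 1 →
      FSpecA g (i, j) (find4A fuel (i : Int) (j : Int) g))
    (g : List (List Int)) (ci cj : Nat)
    (hf : zeros g < fuel + 1) (hc : valN g (ci, cj) = some 1)
    (s0 s1 s2 s3 : Int × List (List Int))
    (h0 : s0 = match pyGet2 g (ci : Int) ((cj : Int) + 1) with
      | none => (1, g)
      | some v => if v = 0 then
          find4A fuel (ci : Int) ((cj : Int) + 1) (pySet2 g (ci : Int) ((cj : Int) + 1))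
        else (0, g))
    (h1 : s1 = match pyGet2 s0.2 ((ci : Int) + 1) (cj : Int) with
      | none => (1, s0.2)
      | some v => if v = 0 then
          find4A fuel ((ci : Int) + 1) (cj : Int) (pySet2 s0.2 ((ci : Int) + 1) (cj : Int))
        else (0, s0.2))
    (h2 : s2 = match pyGet2 s1.2 ((ci : Int) - 1) (cj : Int) with
      | none => (1, s1.2)
      | some v =>
        if v = 0 ∧ 0 ≤ (ci : Int) - 1 then
          find4A fuel ((ci : Int) - 1) (cj : Int) (pySet2 s1.2 ((ci : Int) - 1) (cj : Int))
        else if (ci : Int) - 1 < 0 then (1, s1.2) else (0, s1.2))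
    (h3 : s3 = match pyGet2 s2.2 (ci : Int) ((cj : Int) - 1) with
      | none => (1, s2.2)
      | some v =>
        if v = 0 ∧ 0 ≤ (cj : Int) - 1 then
          find4A fuel (ci : Int) ((cj : Int) - 1) (pySet2 s2.2 (ci : Int) ((cj : Int) - 1))
        else if (cj : Int) - 1 < 0 then (1, s2.2) else (0, s2.2)) :
    FSpecA g (ci, cj) (s0.1 + s1.1 + s2.1 + s3.1, s3.2) := by
  have hMinit : Marks g (fun _ => False) g :=
    ⟨rfl, fun _ => rfl, fun x hx => absurd hx not_false, fun _ _ => rfl⟩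
  have hSinit : SoundS g (ci, cj) (fun _ => False) := fun x hx => absurd hx not_false
  obtain ⟨S0, hM0, hS0, _, hCL0, hRes0, hpos0, hflag0⟩ :=
    stage0_spec fuel IH g ci cj (fun _ => False) g hMinit hSinit hc hf s0 h0
  obtain ⟨S1, hM1, hS1, hmono1, hCL1, hRes1, hpos1, hflag1⟩ :=
    stage1_spec fuel IH g ci cj S0 s0.2 hM0 hS0 hc hf s1 h1
  obtain ⟨S2, hM2, hS2, hmono2, hCL2, hRes2, hpos2, hflag2⟩ :=
    stage2_spec fuel IH g ci cj S1 s1.2 hM1 hS1 hc hf s2 h2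
  obtain ⟨S3, hM3, hS3, hmono3, hCL3, hRes3, hpos3, hflag3⟩ :=
    stage3_spec fuel IH g ci cj S2 s2.2 hM2 hS2 hc hf s3 h3
  have hup0 : ∀ x, S0 x → S3 x := fun x hx => hmono3 _ (hmono2 _ (hmono1 _ hx))
  have hup1 : ∀ x, S1 x → S3 x := fun x hx => hmono3 _ (hmono2 _ hx)
  have hup2 : ∀ x, S2 x → S3 x := fun x hx => hmono3 _ hx
  -- every reachable cell is the start or ends up marked
  have hcomp : ∀ x, reach g (ci, cj) x → x = (ci, cj) ∨ S3 x := by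
    intro x hx
    induction hx with
    | refl => exact Or.inl rfl
    | @step y z hy hadj hz ihy =>
      right
      rcases ihy with he | hS3y
      · subst he
        rcases adjN_cases hadj with he | he | ⟨hge, he⟩ | ⟨hge, he⟩
        · exact hup0 z (he ▸ hRes0 (he ▸ hz))
        · exact hup1 z (he ▸ hRes1 (he ▸ hz))
        · exact hup2 z (he ▸ hRes2 hge (he ▸ hz))
        · exact he ▸ hRes3 hge (he ▸ hz)
      · by_cases hy0 : S0 y
        · exact hup0 z (hCL0 y z hy0 not_false hadj hz)
        · by_cases hy1 : S1 y
          · exact hup1 z (hCL1 y z hy1 hy0 hadj hz)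
          · by_cases hy2 : S2 y
            · exact hup2 z (hCL2 y z hy2 hy1 hadj hz)
            · exact hCL3 y z hS3y hy2 hadj hz
  have hnS3c : ¬ S3 (ci, cj) := by
    intro hs
    have := (hS3 _ hs).2
    rw [hc] at this
    simp at this
  unfold FSpecA
  refine ⟨hM3.1, hM3.2.1, ?_, ?_, by simp; omega, ?_⟩
  · intro x hx
    rcases hcomp x hx with he | hs
    · subst he
      show valN s3.2 (ci, cj) = some 1
      rw [hM3.2.2.2 _ hnS3c]
      exact hc
    · exact hM3.2.2.1 x hs
  · intro x hx
    have : ¬ S3 x := fun hs => hx (hS3 x hs).1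
    exact hM3.2.2.2 x this
  · constructor
    · intro hsum d hd hbd
      have e0 : s0.1 = 0 := by omega
      have e1 : s1.1 = 0 := by omega
      have e2 : s2.1 = 0 := by omega
      have e3 : s3.1 = 0 := by omega
      obtain ⟨hnbd0, hP0⟩ := hflag0.1 e0
      obtain ⟨hnbd1, hP1⟩ := hflag1.1 e1
      obtain ⟨hnbd2, hP2⟩ := hflag2.1 e2
      obtain ⟨hnbd3, hP3⟩ := hflag3.1 e3
      rcases hcomp d hd with he | hs
      · subst he
        rcases hbd with h | h | h | h
        · exact hnbd0 h
        · exact hnbd1 h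
        · exact hnbd2 h
        · exact hnbd3 h
      · by_cases hd0 : S0 d
        · exact hP0 d hd0 not_false hbd
        · by_cases hd1 : S1 d
          · exact hP1 d hd1 hd0 hbd
          · by_cases hd2 : S2 d
            · exact hP2 d hd2 hd1 hbd
            · exact hP3 d hs hd2 hbd
    · intro hall
      have e0 : s0.1 = 0 := hflag0.2
        ⟨fun hbd => hall _ reach.refl (Or.inl hbd), fun d hd _ => hall d (hS0 d hd).1⟩
      have e1 : s1.1 = 0 := hflag1.2
        ⟨fun hbd => hall _ reach.refl (Or.inr (Or.inl hbd)), fun d hd _ => hall d (hS1 d hd).1⟩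
      have e2 : s2.1 = 0 := hflag2.2
        ⟨fun hbd => hall _ reach.refl (Or.inr (Or.inr (Or.inl hbd))), fun d hd _ => hall d (hS2 d hd).1⟩
      have e3 : s3.1 = 0 := hflag3.2
        ⟨fun hbd => hall _ reach.refl (Or.inr (Or.inr (Or.inr hbd))), fun d hd _ => hall d (hS3 d hd).1⟩
      simp [e0, e1, e2, e3]
theorem find4A_spec (fuel : Nat) (g : List (List Int)) (i j : Nat)
    (hf : zeros g < fuel) (hc : valN g (i, j) = some 1) :
    FSpecA g (i, j) (find4A fuel (i : Int) (j : Int) g) := by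
  induction fuel generalizing g i j with
  | zero => omega
  | succ fuel IH =>
    exact assembleA fuel (fun g i j hf hc => IH g i j hf hc) g i j hf hc _ _ _ _ rfl rfl rfl rfl


def castC (c : Nat × Nat) : Int × Int := ((c.1 : Int), (c.2 : Int))

theorem toCell_castC (c : Nat × Nat) : toCell (castC c) = c := by
  simp [toCell, castC]

-- invariant while one popped cell pc is being processed: L = cells marked and
-- pushed so far during this step
def BInv (g : List (List Int)) (pc : Nat × Nat) (h : List (List Int)) (L : List (Nat × Nat)) : Prop :=
  h.length = g.length ∧ (∀ i, rowLenN h i = rowLenN g i) ∧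
  (∀ x ∈ L, adjN pc x ∧ valN g x = some 0) ∧
  (∀ x, x ∈ L → valN h x = some 1) ∧ (∀ x, x ∉ L → valN h x = valN g x) ∧
  zeros h + L.length ≤ zeros g

-- one direction of B's per-cell processing
theorem stageB_spec (g : List (List Int)) (pc : Nat × Nat) (h : List (List Int))
    (L : List (Nat × Nat)) (rest : List (Int × Int)) (b : Bool)
    (hInv : BInv g pc h L) (n1 n2 : Nat) (hadj : adjN pc (n1, n2))
    (G : Prop) [inst : Decidable G] (BD : Prop) (hGiff : G ↔ ¬ BD)
    (res : List (List Int) × List (Int × Int) × Bool)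
    (hres : res = if G then
        (if pyGet2 h (n1 : Int) (n2 : Int) = some 0 then
          (pySet2 h (n1 : Int) (n2 : Int), ((n1 : Int), (n2 : Int)) :: (L.map castC ++ rest), b)
         else (h, L.map castC ++ rest, b))
      else (h, L.map castC ++ rest, true)) :
    ∃ L', BInv g pc res.1 L' ∧ (∀ x ∈ L, x ∈ L') ∧
      res.2.1 = L'.map castC ++ rest ∧
      (G → valN g (n1, n2) = some 0 → (n1, n2) ∈ L') ∧
      (res.2.2 = true ↔ b = true ∨ BD) := by
  obtain ⟨hlen, hrow, hLprop, hLone, hLkeep, hzl⟩ := hInv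
  by_cases hG : G
  · rw [if_pos hG] at hres
    by_cases hrd : pyGet2 h (n1 : Int) (n2 : Int) = some 0
    · rw [if_pos hrd] at hres
      rw [pyGet2_natCast] at hrd
      have hnotL : (n1, n2) ∉ L := by
        intro hmem
        rw [hLone _ hmem] at hrd; simp at hrd
      have hg0 : valN g (n1, n2) = some 0 := by
        rw [← hLkeep _ hnotL]; exact hrd
      rw [pySet2_natCast h n1 n2 0 hrd] at hres
      subst hres
      refine ⟨(n1, n2) :: L, ⟨(length_setN h (n1, n2)).trans hlen,
        fun i => (rowLenN_setN h (n1, n2) i).trans (hrow i), ?_, ?_, ?_, ?_⟩,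
        fun x hx => List.mem_cons_of_mem _ hx, by simp [castC], fun _ _ => List.mem_cons_self,
        by simp [hGiff.1 hG]⟩
      · intro x hx
        rcases List.mem_cons.1 hx with rfl | hx
        · exact ⟨hadj, hg0⟩
        · exact hLprop x hx
      · intro x hx
        rcases List.mem_cons.1 hx with rfl | hx
        · exact valN_setN_self h (n1, n2) 0 hrd
        · rw [valN_setN_ne h (n1, n2) x (by rintro rfl; exact hnotL hx)]
          exact hLone x hx
      · intro x hx
        have hxn : x ≠ (n1, n2) := fun he => hx (he ▸ List.mem_cons_self)
        have hxL : x ∉ L := fun hm => hx (List.mem_cons_of_mem _ hm)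
        rw [valN_setN_ne h (n1, n2) x hxn]
        exact hLkeep x hxL
      · have := zeros_setN_lt h (n1, n2) hrd
        simp
        omega
    · rw [if_neg hrd] at hres
      rw [pyGet2_natCast] at hrd
      subst hres
      refine ⟨L, ⟨hlen, hrow, hLprop, hLone, hLkeep, hzl⟩, fun x hx => hx, rfl, ?_,
        by simp [hGiff.1 hG]⟩
      intro _ h0
      by_cases hmem : (n1, n2) ∈ L
      · exact hmem
      · exact absurd (by rw [hLkeep _ hmem]; exact h0) hrd
  · rw [if_neg hG] at hres
    subst hres
    refine ⟨L, ⟨hlen, hrow, hLprop, hLone, hLkeep, hzl⟩, fun x hx => hx, rfl,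
      fun hGtrue => absurd hGtrue hG, ?_⟩
    simp
    by_contra hBD
    rw [not_or] at hBD
    exact hG (hGiff.2 hBD.2)

-- processing one popped cell and recursing on the remaining stack
set_option maxHeartbeats 1000000 in
theorem assembleB (fuel : Nat)
    (IH : ∀ (st : List (Int × Int)) (g : List (List Int)) (t : Bool),
      5 * zeros g + st.length < fuel →
      (∀ p ∈ st, 0 ≤ p.1 ∧ 0 ≤ p.2 ∧ valN g (toCell p) = some 1) →
      FSpecB g st t (floodB fuel st g t))
    (g : List (List Int)) (ni nj : Nat) (rest : List (Int × Int)) (t : Bool)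
    (hf : 5 * zeros g + (rest.length + 1) < fuel + 1)
    (hpc : valN g (ni, nj) = some 1)
    (hrest : ∀ p ∈ rest, 0 ≤ p.1 ∧ 0 ≤ p.2 ∧ valN g (toCell p) = some 1)
    (q0 q1 q2 q3 : List (List Int) × List (Int × Int) × Bool)
    (h0 : q0 = if (nj : Int) + 1 < rowLenI g (ni : Int) then
        (if pyGet2 g (ni : Int) ((nj : Int) + 1) = some 0 then
          (pySet2 g (ni : Int) ((nj : Int) + 1), ((ni : Int), (nj : Int) + 1) :: rest, t)
         else (g, rest, t))
      else (g, rest, true))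
    (h1 : q1 = if (ni : Int) + 1 < (q0.1.length : Int) ∧ (nj : Int) < rowLenI q0.1 ((ni : Int) + 1) then
        (if pyGet2 q0.1 ((ni : Int) + 1) (nj : Int) = some 0 then
          (pySet2 q0.1 ((ni : Int) + 1) (nj : Int), ((ni : Int) + 1, (nj : Int)) :: q0.2.1, q0.2.2)
         else (q0.1, q0.2.1, q0.2.2))
      else (q0.1, q0.2.1, true))
    (h2 : q2 = if 0 ≤ (ni : Int) - 1 ∧ (nj : Int) < rowLenI q1.1 ((ni : Int) - 1) then
        (if pyGet2 q1.1 ((ni : Int) - 1) (nj : Int) = some 0 then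
          (pySet2 q1.1 ((ni : Int) - 1) (nj : Int), ((ni : Int) - 1, (nj : Int)) :: q1.2.1, q1.2.2)
         else (q1.1, q1.2.1, q1.2.2))
      else (q1.1, q1.2.1, true))
    (h3 : q3 = if 0 ≤ (nj : Int) - 1 then
        (if pyGet2 q2.1 (ni : Int) ((nj : Int) - 1) = some 0 then
          (pySet2 q2.1 (ni : Int) ((nj : Int) - 1), ((ni : Int), (nj : Int) - 1) :: q2.2.1, q2.2.2)
         else (q2.1, q2.2.1, q2.2.2))
      else (q2.1, q2.2.1, true)) :
    FSpecB g (((ni : Int), (nj : Int)) :: rest) t (floodB fuel q3.2.1 q3.1 q3.2.2) := by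
  have hInv0 : BInv g (ni, nj) g [] :=
    ⟨rfl, fun _ => rfl, by simp, by simp, fun _ _ => rfl, by simp⟩
  have hlt := valN_lt_of_some g ni nj 1 hpc
  -- direction right
  have hcast0 : ((nj : Int) + 1) = ((nj + 1 : Nat) : Int) := by push_cast; ring
  rw [hcast0] at h0
  have hG0iff : (((nj + 1 : Nat) : Int) < rowLenI g (ni : Int)) ↔ ¬ bd0 g (ni, nj) := by
    rw [rowLenI_natCast]
    simp [bd0]
    omega
  obtain ⟨L0, hI0, hm0, hstk0, hRes0, hT0⟩ :=
    stageB_spec g (ni, nj) g [] rest t hInv0 ni (nj + 1) (adjN_right ni nj)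
      _ (bd0 g (ni, nj)) hG0iff q0 h0
  have hRes0' : valN g (ni, nj + 1) = some 0 → (ni, nj + 1) ∈ L0 := by
    intro h0v
    refine hRes0 (hG0iff.2 ?_) h0v
    have := (valN_lt_of_some g ni (nj + 1) 0 h0v).2
    simp [bd0]; omega
  -- direction down
  have hcast1 : ((ni : Int) + 1) = ((ni + 1 : Nat) : Int) := by push_cast; ring
  rw [hcast1, hstk0] at h1
  have hG1iff : (((ni + 1 : Nat) : Int) < (q0.1.length : Int) ∧
      (nj : Int) < rowLenI q0.1 ((ni + 1 : Nat) : Int)) ↔ ¬ bd1 g (ni, nj) := by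
    rw [rowLenI_natCast, hI0.2.1 (ni + 1), hI0.1]
    simp [bd1]
    omega
  obtain ⟨L1, hI1, hm1, hstk1, hRes1, hT1⟩ :=
    stageB_spec g (ni, nj) q0.1 L0 rest q0.2.2 hI0 (ni + 1) nj (adjN_down ni nj)
      _ (bd1 g (ni, nj)) hG1iff q1 h1
  have hRes1' : valN g (ni + 1, nj) = some 0 → (ni + 1, nj) ∈ L1 := by
    intro h0v
    refine hRes1 (hG1iff.2 ?_) h0v
    have := valN_lt_of_some g (ni + 1) nj 0 h0v
    simp [bd1]; omega
  -- direction up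
  have hstage2 : ∃ L', BInv g (ni, nj) q2.1 L' ∧ (∀ x ∈ L1, x ∈ L') ∧
      q2.2.1 = L'.map castC ++ rest ∧
      (1 ≤ ni → valN g (ni - 1, nj) = some 0 → (ni - 1, nj) ∈ L') ∧
      (q2.2.2 = true ↔ q1.2.2 = true ∨ bd2 g (ni, nj)) := by
    by_cases hni : ni = 0
    · have hGf : ¬ (0 ≤ (ni : Int) - 1 ∧ (nj : Int) < rowLenI q1.1 ((ni : Int) - 1)) := by
        rintro ⟨hx, _⟩; omega
      rw [if_neg hGf] at h2
      subst h2
      exact ⟨L1, hI1, fun x hx => hx, hstk1, fun h1c _ => absurd h1c (by omega),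
        ⟨fun _ => Or.inr (Or.inl hni), fun _ => rfl⟩⟩
    · have hcast2 : ((ni : Int) - 1) = ((ni - 1 : Nat) : Int) := by omega
      rw [hcast2, hstk1] at h2
      have hG2iff : (0 ≤ ((ni - 1 : Nat) : Int) ∧
          (nj : Int) < rowLenI q1.1 ((ni - 1 : Nat) : Int)) ↔ ¬ bd2 g (ni, nj) := by
        rw [rowLenI_natCast, hI1.2.1 (ni - 1)]
        simp [bd2]
        omega
      obtain ⟨L2, hI2, hm2, hstk2, hRes2, hT2⟩ :=
        stageB_spec g (ni, nj) q1.1 L1 rest q1.2.2 hI1 (ni - 1) nj (adjN_up ni nj (by omega))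
          _ (bd2 g (ni, nj)) hG2iff q2 h2
      refine ⟨L2, hI2, hm2, hstk2, ?_, hT2⟩
      intro _ h0v
      refine hRes2 (hG2iff.2 ?_) h0v
      have := (valN_lt_of_some g (ni - 1) nj 0 h0v).2
      simp [bd2]; omega
  obtain ⟨L2, hI2, hm2, hstk2, hRes2', hT2⟩ := hstage2
  -- direction left
  have hstage3 : ∃ L', BInv g (ni, nj) q3.1 L' ∧ (∀ x ∈ L2, x ∈ L') ∧
      q3.2.1 = L'.map castC ++ rest ∧
      (1 ≤ nj → valN g (ni, nj - 1) = some 0 → (ni, nj - 1) ∈ L') ∧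
      (q3.2.2 = true ↔ q2.2.2 = true ∨ bd3 g (ni, nj)) := by
    by_cases hnj : nj = 0
    · have hGf : ¬ (0 ≤ (nj : Int) - 1) := by omega
      rw [if_neg hGf] at h3
      subst h3
      exact ⟨L2, hI2, fun x hx => hx, hstk2, fun h1c _ => absurd h1c (by omega),
        ⟨fun _ => Or.inr hnj, fun _ => rfl⟩⟩
    · have hcast3 : ((nj : Int) - 1) = ((nj - 1 : Nat) : Int) := by omega
      rw [hcast3, hstk2] at h3
      have hG3iff : (0 ≤ ((nj - 1 : Nat) : Int)) ↔ ¬ bd3 g (ni, nj) := by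
        simp [bd3]
        omega
      obtain ⟨L3, hI3, hm3, hstk3, hRes3, hT3⟩ :=
        stageB_spec g (ni, nj) q2.1 L2 rest q2.2.2 hI2 ni (nj - 1) (adjN_left ni nj (by omega))
          _ (bd3 g (ni, nj)) hG3iff q3 h3
      refine ⟨L3, hI3, hm3, hstk3, ?_, hT3⟩
      intro _ h0v
      exact hRes3 (hG3iff.2 (by simp [bd3]; omega)) h0v
  obtain ⟨L3, hI3, hm3, hstk3, hRes3', hT3⟩ := hstage3
  have hup0 : ∀ x ∈ L0, x ∈ L3 := fun x hx => hm3 _ (hm2 _ (hm1 _ hx))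
  have hup1 : ∀ x ∈ L1, x ∈ L3 := fun x hx => hm3 _ (hm2 _ hx)
  -- the IH applies to the new stack over the updated grid
  have hfuel4 : 5 * zeros q3.1 + q3.2.1.length < fuel := by
    have hzl := hI3.2.2.2.2.2
    rw [hstk3, List.length_append, List.length_map]
    omega
  have hLnotrest : ∀ p ∈ rest, toCell p ∉ L3 := by
    intro p hp hmem
    have h0v := (hI3.2.2.1 _ hmem).2
    rw [(hrest p hp).2.2] at h0v
    simp at h0v
  have hst4 : ∀ p ∈ q3.2.1, 0 ≤ p.1 ∧ 0 ≤ p.2 ∧ valN q3.1 (toCell p) = some 1 := by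
    intro p hp
    rw [hstk3] at hp
    rcases List.mem_append.1 hp with hp | hp
    · obtain ⟨x, hx, rfl⟩ := List.mem_map.1 hp
      refine ⟨by simp [castC], by simp [castC], ?_⟩
      rw [toCell_castC]
      exact hI3.2.2.2.1 x hx
    · refine ⟨(hrest p hp).1, (hrest p hp).2.1, ?_⟩
      rw [hI3.2.2.2.2.1 _ (hLnotrest p hp)]
      exact (hrest p hp).2.2
  have hIH := IH q3.2.1 q3.1 q3.2.2 hfuel4 hst4
  set r := floodB fuel q3.2.1 q3.1 q3.2.2 with hr
  obtain ⟨hIHl, hIHr, hIHmark, hIHkeep, hIHt⟩ := hIH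
  -- relating reach over g to reach over the updated grid
  have hzsub : ∀ y, valN q3.1 y = some 0 → valN g y = some 0 := by
    intro y hy
    by_cases hmem : y ∈ L3
    · rw [hI3.2.2.2.1 y hmem] at hy; simp at hy
    · rw [← hI3.2.2.2.2.1 y hmem]; exact hy
  have hLreach : ∀ x ∈ L3, reach g (ni, nj) x := fun x hx =>
    reach.step reach.refl (hI3.2.2.1 x hx).1 (hI3.2.2.1 x hx).2
  have hLU : ∀ x ∈ L3, Reaches q3.1 q3.2.1 x := by
    intro x hx
    refine ⟨castC x, ?_, ?_⟩
    · rw [hstk3]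
      exact List.mem_append.2 (Or.inl (List.mem_map.2 ⟨x, hx, rfl⟩))
    · rw [toCell_castC]; exact reach.refl
  have hincl1 : ∀ x, Reaches q3.1 q3.2.1 x → Reaches g (((ni : Int), (nj : Int)) :: rest) x := by
    rintro x ⟨p, hp, hrx⟩
    rw [hstk3] at hp
    rcases List.mem_append.1 hp with hp | hp
    · obtain ⟨y, hy, rfl⟩ := List.mem_map.1 hp
      rw [toCell_castC] at hrx
      refine ⟨((ni : Int), (nj : Int)), List.mem_cons_self, ?_⟩
      have : reach g y x := reach_mono hzsub hrx
      have hhead : reach g (ni, nj) x := reach_trans (hLreach y hy) this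
      simpa [toCell] using hhead
    · exact ⟨p, List.mem_cons_of_mem _ hp, reach_mono hzsub hrx⟩
  have hstep : ∀ y z, adjN y z → valN g z = some 0 →
      (y = (ni, nj) ∨ Reaches q3.1 q3.2.1 y) → Reaches q3.1 q3.2.1 z := by
    intro y z hadj hz hy
    rcases hy with rfl | ⟨q, hq, hry⟩
    · rcases adjN_cases hadj with rfl | rfl | ⟨hge, rfl⟩ | ⟨hge, rfl⟩
      · exact hLU _ (hup0 _ (hRes0' hz))
      · exact hLU _ (hup1 _ (hRes1' hz))
      · exact hLU _ (hm3 _ (hRes2' hge hz))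
      · exact hLU _ (hRes3' hge hz)
    · by_cases h4z : valN q3.1 z = some 0
      · exact ⟨q, hq, reach.step hry hadj h4z⟩
      · have hmem : z ∈ L3 := by
          by_contra hmem
          exact h4z ((hI3.2.2.2.2.1 z hmem).trans hz)
        exact hLU _ hmem
  have hcover : ∀ (x c : Nat × Nat), reach g c x →
      (c = (ni, nj) ∨ Reaches q3.1 q3.2.1 c) → x = (ni, nj) ∨ Reaches q3.1 q3.2.1 x := by
    intro x c hrx hc
    induction hrx with
    | refl => exact hc
    | @step y z hy hadj hz ih => exact Or.inr (hstep y z hadj hz ih)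
  have hincl3 : ∀ x, Reaches g (((ni : Int), (nj : Int)) :: rest) x →
      x = (ni, nj) ∨ Reaches q3.1 q3.2.1 x := by
    rintro x ⟨p, hp, hrx⟩
    rcases List.mem_cons.1 hp with rfl | hp
    · exact hcover x _ hrx (Or.inl (by simp [toCell]))
    · exact hcover x _ hrx (Or.inr ⟨p, by rw [hstk3]; exact List.mem_append.2 (Or.inr hp), reach.refl⟩)
  have hpcL3 : (ni, nj) ∉ L3 := by
    intro hmem
    have := (hI3.2.2.1 _ hmem).2
    rw [hpc] at this; simp at this
  have hbcong : ∀ d, border q3.1 d ↔ border g d := fun d => border_congr d hI3.1 hI3.2.1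
  have hTchain : q3.2.2 = true ↔ t = true ∨ border g (ni, nj) := by
    constructor
    · intro h
      rcases hT3.1 h with h | hb
      · rcases hT2.1 h with h | hb
        · rcases hT1.1 h with h | hb
          · rcases hT0.1 h with h | hb
            · exact Or.inl h
            · exact Or.inr (Or.inl hb)
          · exact Or.inr (Or.inr (Or.inl hb))
        · exact Or.inr (Or.inr (Or.inr (Or.inl hb)))
      · exact Or.inr (Or.inr (Or.inr (Or.inr hb)))
    · intro h
      have hbord : q3.2.2 = true ∨ q2.2.2 = true ∨ q1.2.2 = true ∨ q0.2.2 = true ∨ t = true := by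
        rcases h with h | hbord
        · exact Or.inr (Or.inr (Or.inr (Or.inr h)))
        · rcases hbord with hb | hb | hb | hb
          · exact Or.inr (Or.inr (Or.inr (Or.inl (hT0.2 (Or.inr hb)))))
          · exact Or.inr (Or.inr (Or.inl (hT1.2 (Or.inr hb))))
          · exact Or.inr (Or.inl (hT2.2 (Or.inr hb)))
          · exact Or.inl (hT3.2 (Or.inr hb))
      rcases hbord with h | h | h | h | h
      · exact h
      · exact hT3.2 (Or.inl h)
      · exact hT3.2 (Or.inl (hT2.2 (Or.inl h)))
      · exact hT3.2 (Or.inl (hT2.2 (Or.inl (hT1.2 (Or.inl h)))))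
      · exact hT3.2 (Or.inl (hT2.2 (Or.inl (hT1.2 (Or.inl (hT0.2 (Or.inl h)))))))
  refine ⟨hIHl.trans hI3.1, fun i => (hIHr i).trans (hI3.2.1 i), ?_, ?_, ?_⟩
  · intro x hx
    rcases hincl3 x hx with rfl | hU
    · by_cases hU : Reaches q3.1 q3.2.1 (ni, nj)
      · exact hIHmark _ hU
      · rw [hIHkeep _ hU, hI3.2.2.2.2.1 _ hpcL3]
        exact hpc
    · exact hIHmark _ hU
  · intro x hx
    have hnU : ¬ Reaches q3.1 q3.2.1 x := fun hU => hx (hincl1 x hU)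
    have hnL : x ∉ L3 := by
      intro hmem
      exact hx ⟨((ni : Int), (nj : Int)), List.mem_cons_self, by simpa [toCell] using hLreach x hmem⟩
    rw [hIHkeep _ hnU]
    exact hI3.2.2.2.2.1 x hnL
  · rw [hIHt]
    constructor
    · rintro (ht4 | ⟨p, hp, d, hrd, hbd⟩)
      · rcases hTchain.1 ht4 with ht | hbd
        · exact Or.inl ht
        · exact Or.inr ⟨((ni : Int), (nj : Int)), List.mem_cons_self, (ni, nj),
            by simpa [toCell] using (reach.refl : reach g (ni, nj) (ni, nj)), hbd⟩
      · obtain ⟨p', hp', hr'⟩ := hincl1 d ⟨p, hp, hrd⟩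
        exact Or.inr ⟨p', hp', d, hr', (hbcong d).1 hbd⟩
    · rintro (ht | ⟨p, hp, d, hrd, hbd⟩)
      · exact Or.inl (hTchain.2 (Or.inl ht))
      · rcases hincl3 d ⟨p, hp, hrd⟩ with rfl | ⟨q, hq, hrq⟩
        · exact Or.inl (hTchain.2 (Or.inr hbd))
        · exact Or.inr ⟨q, hq, d, hrq, (hbcong d).2 hbd⟩
theorem floodB_spec (fuel : Nat) (st : List (Int × Int)) (g : List (List Int)) (t : Bool)
    (hf : 5 * zeros g + st.length < fuel)
    (hst : ∀ p ∈ st, 0 ≤ p.1 ∧ 0 ≤ p.2 ∧ valN g (toCell p) = some 1) :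
    FSpecB g st t (floodB fuel st g t) := by
  induction fuel generalizing st g t with
  | zero => omega
  | succ fuel IH =>
    match st, hst with
    | [], _ =>
      show FSpecB g [] t (g, t)
      refine ⟨rfl, fun _ => rfl, ?_, fun _ _ => rfl, ?_⟩
      · rintro x ⟨p, hp, _⟩; simp at hp
      · simp
    | (i, j) :: rest, hst =>
      obtain ⟨hi, hj, hval⟩ := hst (i, j) List.mem_cons_self
      have hrest : ∀ p ∈ rest, 0 ≤ p.1 ∧ 0 ≤ p.2 ∧ valN g (toCell p) = some 1 :=
        fun p hp => hst p (List.mem_cons_of_mem _ hp)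
      obtain ⟨ni, rfl⟩ : ∃ n : Nat, i = (n : Int) := ⟨i.toNat, by omega⟩
      obtain ⟨nj, rfl⟩ : ∃ n : Nat, j = (n : Int) := ⟨j.toNat, by omega⟩
      simp only [toCell, Int.toNat_natCast] at hval
      simp only [List.length_cons] at hf
      exact assembleB fuel (fun st g t h1 h2 => IH st g t h1 h2) g ni nj rest t
        (by omega) hval hrest _ _ _ _ rfl rfl rfl rfl

-- starting from one freshly marked 0-cell, A's recursion and B's flood fill
-- produce the same grid and agree on whether the component touched the border
theorem cell_eq (g : List (List Int)) (i j : Nat) (h0 : valN g (i, j) = some 0) :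
    (find4A (zeros (setN g (i, j)) + 1) (i : Int) (j : Int) (setN g (i, j))).2 =
      (floodB (5 * zeros (setN g (i, j)) + 5) [((i : Int), (j : Int))] (setN g (i, j)) false).1 ∧
    ((find4A (zeros (setN g (i, j)) + 1) (i : Int) (j : Int) (setN g (i, j))).1 = 0 ↔
      (floodB (5 * zeros (setN g (i, j)) + 5) [((i : Int), (j : Int))] (setN g (i, j)) false).2 = false) := by
  set g1 := setN g (i, j) with hg1
  have hc : valN g1 (i, j) = some 1 := valN_setN_self g (i, j) 0 h0
  obtain ⟨hAl, hAr, hAmark, hAkeep, _, hAflag⟩ :=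
    find4A_spec (zeros g1 + 1) g1 i j (by omega) hc
  obtain ⟨hBl, hBr, hBmark, hBkeep, hBt⟩ :=
    floodB_spec (5 * zeros g1 + 5) [((i : Int), (j : Int))] g1 false (by simp only [List.length_singleton]; omega)
      (by rintro p hp; rcases List.mem_singleton.1 hp with rfl; exact ⟨by simp, by simp, by simpa [toCell] using hc⟩)
  have hRiff : ∀ x, Reaches g1 [((i : Int), (j : Int))] x ↔ reach g1 (i, j) x := by
    intro x
    constructor
    · rintro ⟨p, hp, hr⟩
      rcases List.mem_singleton.1 hp with rfl
      simpa [toCell] using hr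
    · intro hr
      exact ⟨((i : Int), (j : Int)), List.mem_singleton.2 rfl, by simpa [toCell] using hr⟩
  constructor
  · refine grid_ext _ _ (hAl.trans hBl.symm) (fun x => ?_)
    by_cases hx : reach g1 (i, j) x
    · rw [hAmark x hx, hBmark x ((hRiff x).2 hx)]
    · rw [hAkeep x hx, hBkeep x (fun hU => hx ((hRiff x).1 hU))]
  · rw [hAflag]
    constructor
    · intro hall
      cases hb : (floodB (5 * zeros g1 + 5) [((i : Int), (j : Int))] g1 false).2
      · rfl
      · rcases hBt.1 hb with hfalse | ⟨p, hp, d, hrd, hbd⟩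
        · simp at hfalse
        · rcases List.mem_singleton.1 hp with rfl
          exact absurd hbd (hall d (by simpa [toCell] using hrd))
    · intro hb d hrd hbd
      have : (floodB (5 * zeros g1 + 5) [((i : Int), (j : Int))] g1 false).2 = true :=
        hBt.2 (Or.inr ⟨((i : Int), (j : Int)), List.mem_singleton.2 rfl, d,
          by simpa [toCell] using hrd, hbd⟩)
      rw [hb] at this
      simp at this

theorem inner_eq (i : Nat) (js : List Nat) (s : List (List Int) × Int) :
    innerA i js s = innerB i js s := by
  induction js generalizing s with
  | nil => obtain ⟨g, cnt⟩ := s; rfl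
  | cons j js ih =>
    obtain ⟨g, cnt⟩ := s
    show innerA i (j :: js) (g, cnt) = innerB i (j :: js) (g, cnt)
    rcases hread : pyGet2 g (i : Int) (j : Int) with _ | v
    · simp only [innerA, innerB, hread]
      exact ih (g, cnt)
    · by_cases hv : v = 0
      · subst hv
        have h0 : valN g (i, j) = some 0 := by rwa [pyGet2_natCast] at hread
        have hset : pySet2 g (i : Int) (j : Int) = setN g (i, j) := pySet2_natCast g i j 0 h0
        obtain ⟨hgeq, hfeq⟩ := cell_eq g i j h0
        simp only [innerA, innerB, hread, hset]
        rw [if_pos trivial, if_pos trivial, hgeq]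
        rcases hb : (floodB (5 * zeros (setN g (i, j)) + 5) [((i : Int), (j : Int))]
            (setN g (i, j)) false).2 with _ | _
        · rw [if_pos (hfeq.2 hb)]
          exact ih _
        · rw [if_neg (fun hz => by rw [hfeq.1 hz] at hb; cases hb)]
          exact ih _
      · simp only [innerA, innerB, hread, if_neg hv]
        exact ih (g, cnt)

theorem outer_eq (is : List Nat) (s : List (List Int) × Int) :
    outerA is s = outerB is s := by
  induction is generalizing s with
  | nil => obtain ⟨g, cnt⟩ := s; rfl
  | cons i is ih =>
    obtain ⟨g, cnt⟩ := s
    show outerA (i :: is) (g, cnt) = outerB (i :: is) (g, cnt)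
    simp only [outerA, outerB]
    rw [inner_eq]
    exact ih _

-- ===== VERDICT (by name: the statement is the Claim_ definition above) =====
theorem get_island_spec : Claim_equal_get_island := by
  intro input _
  unfold Spec_get_island get_island get_island_alt
  rw [outer_eq]
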